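-- pv_equiv track=rewrite | github.com/nhl0000l/LongNH | number_complement.py | decimalToFlipBinary
-- ===== SOURCE A (Python) =====
-- def decimalToFlipBinary(decimal):
--     binaryArr = []
--     while(decimal > 0):
--         binaryArr.append(decimal % 2)
--         decimal = decimal // 2
--     binaryArr.reverse()
--
--     for i in range(len(binaryArr)):
--         if binaryArr[i] == 1:
--             binaryArr[i] = 0
--         elif binaryArr[i] == 0:
--             binaryArr[i] = 1
--     return binaryArr
-- ===== SOURCE B (Python) =====
-- def decimalToFlipBinary(decimal):
--     if decimal <= 0:
--         return []
--     width = decimal.bit_length()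
--     comp = decimal ^ ((1 << width) - 1)
--     return [(comp >> (width - 1 - i)) & 1 for i in range(width)]
-- ===== Notes on version B (the rewrite author's own statement) =====
-- stated objective: idiomatic
-- what changed: Replaces the extract-digits/reverse/flip-in-place three-stage loop by one XOR with a bit_length-wide mask followed by a single MSB-first shift-and-mask comprehension.
import Mathlib
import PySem

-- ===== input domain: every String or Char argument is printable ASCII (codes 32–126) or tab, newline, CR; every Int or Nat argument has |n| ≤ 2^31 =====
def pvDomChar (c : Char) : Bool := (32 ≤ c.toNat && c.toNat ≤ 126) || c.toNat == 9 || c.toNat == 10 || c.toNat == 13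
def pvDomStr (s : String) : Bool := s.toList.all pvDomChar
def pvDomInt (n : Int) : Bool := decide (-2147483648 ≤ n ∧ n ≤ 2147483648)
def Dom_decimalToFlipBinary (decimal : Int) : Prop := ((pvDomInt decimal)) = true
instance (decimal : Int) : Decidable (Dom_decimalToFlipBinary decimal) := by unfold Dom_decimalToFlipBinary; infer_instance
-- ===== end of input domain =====

-- B replaces A's extract-digits / reverse / flip-in-place stages by one XOR with a
-- bit_length-wide mask and a single MSB-first shift-and-mask pass (idiomatic, same cost).

-- ===== PORT A =====
-- the 'while decimal > 0' loop: append decimal % 2, halve (LSB-first list)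
def pvLoopA (decimal : Int) : List Int :=
  if _h : decimal > 0 then
    PySem.Int.mod decimal 2 :: pvLoopA (PySem.Int.floordiv decimal 2)
  else []
termination_by decimal.toNat
decreasing_by
  have := PySem.Int.floordiv_eq_ediv_of_pos (a := decimal) (b := 2) (by omega)
  omega

-- the 'for i in range(len(...))' in-place flip, applied to each element
def pvFlip (b : Int) : Int := if b = 1 then 0 else if b = 0 then 1 else b

def decimalToFlipBinary (decimal : Int) : List Int :=
  ((pvLoopA decimal).reverse).map pvFlip

-- ===== PORT B =====
def decimalToFlipBinary_alt (decimal : Int) : List Int :=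
  if decimal ≤ 0 then []
  else
    let width := PySem.Int.bitLength decimal
    let comp := PySem.Int.bxor decimal ((1 <<< width) - 1)
    (List.range width).map (fun i => PySem.Int.band (comp >>> (width - 1 - i)) 1)

-- ===== PRECONDITION & SPEC =====
def Spec_decimalToFlipBinary (decimal : Int) (out : List Int) : Prop := out = decimalToFlipBinary_alt decimal
instance (decimal : Int) (out : List Int) : Decidable (Spec_decimalToFlipBinary decimal out) := by unfold Spec_decimalToFlipBinary; infer_instance

-- ===== CLAIM (what is proved, stated in full; the proofs are below) =====
def Claim_equal_decimalToFlipBinary : Prop := ∀ (decimal : Int), Dom_decimalToFlipBinary decimal → Spec_decimalToFlipBinary decimal (decimalToFlipBinary decimal)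

-- ===== LEMMAS AND PROOFS =====

-- LSB-first binary digits of a natural number (proof-side reference)
def pvBitsN (m : Nat) : List Int :=
  if m = 0 then [] else ((m % 2 : Nat) : Int) :: pvBitsN (m / 2)

theorem pvLoopA_natCast (m : Nat) : pvLoopA (m : Int) = pvBitsN m := by
  induction m using Nat.strong_induction_on with
  | _ m ih =>
    rw [pvLoopA, pvBitsN]
    by_cases h0 : m = 0
    · simp [h0]
    · have hpos : (0:Int) < (m:Int) := by exact_mod_cast Nat.pos_of_ne_zero h0
      rw [dif_pos hpos, if_neg h0]
      rw [show PySem.Int.floordiv (m:Int) 2 = ((m / 2 : Nat) : Int) from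
        PySem.Int.floordiv_natCast m 2]
      rw [ih (m / 2) (Nat.div_lt_self (Nat.pos_of_ne_zero h0) (by norm_num))]
      congr 1
      exact PySem.Int.mod_natCast m 2

theorem pvBitsN_length (m : Nat) : (pvBitsN m).length = PySem.Int.bitLength (m : Int) := by
  induction m using Nat.strong_induction_on with
  | _ m ih =>
    rw [pvBitsN]
    by_cases h0 : m = 0
    · simp [h0, PySem.Int.bitLength_zero]
    · rw [if_neg h0]
      rw [PySem.Int.bitLength_natCast (Nat.pos_of_ne_zero h0)]
      simp [ih (m / 2) (Nat.div_lt_self (Nat.pos_of_ne_zero h0) (by norm_num))]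

theorem pvBitsN_getD (m : Nat) (k : Nat) (h : k < (pvBitsN m).length) :
    (pvBitsN m).getD k 0 = if m.testBit k then 1 else 0 := by
  induction m using Nat.strong_induction_on generalizing k with
  | _ m ih =>
    by_cases h0 : m = 0
    · rw [pvBitsN, if_pos h0] at h; simp at h
    · have hbits : pvBitsN m = ((m % 2 : Nat) : Int) :: pvBitsN (m / 2) := by
        rw [pvBitsN, if_neg h0]
      rw [hbits] at h ⊢
      cases k with
      | zero =>
        simp only [List.getD_cons_zero]
        rw [Nat.testBit_zero]
        rcases Nat.mod_two_eq_zero_or_one m with hm | hm <;> simp [hm]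
      | succ k =>
        simp only [List.getD_cons_succ]
        rw [ih (m / 2) (Nat.div_lt_self (Nat.pos_of_ne_zero h0) (by norm_num)) k
          (by simpa using h)]
        rw [Nat.testBit_succ]

-- ===== VERDICT (by name: the statement is the Claim_ definition above) =====

theorem decimalToFlipBinary_spec : Claim_equal_decimalToFlipBinary := by
  intro decimal _
  unfold Spec_decimalToFlipBinary decimalToFlipBinary
  by_cases hle : decimal ≤ 0
  · rw [decimalToFlipBinary_alt, if_pos hle, pvLoopA]
    rw [dif_neg (by omega)]
    simp
  · have hpos : 0 < decimal := by omega
    obtain ⟨m, rfl⟩ : ∃ m : Nat, decimal = (m : Int) :=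
      ⟨decimal.toNat, (Int.toNat_of_nonneg (le_of_lt hpos)).symm⟩
    have hm0 : m ≠ 0 := by
      rintro rfl; simp at hpos
    set w := PySem.Int.bitLength (m : Int) with hw
    have hwpos : 0 < w := by
      rw [hw, PySem.Int.bitLength_natCast (Nat.pos_of_ne_zero hm0)]; omega
    have hlen : (pvLoopA (m : Int)).length = w := by
      rw [pvLoopA_natCast]; exact pvBitsN_length m
    -- the mask as a natural number
    have hmask : (((1 <<< w : Nat) : Int)) - 1 = ((2 ^ w - 1 : Nat) : Int) := by
      have h1 : (1 <<< w : Nat) = 2 ^ w := Nat.one_shiftLeft w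
      rw [h1]
      have h2 : (1:Nat) ≤ 2 ^ w := Nat.one_le_two_pow
      push_cast [h2]
      ring
    have hcomp : PySem.Int.bxor (m : Int) (((1 <<< w : Nat) : Int) - 1)
        = ((m ^^^ (2 ^ w - 1) : Nat) : Int) := by
      rw [hmask]; exact PySem.Int.bxor_natCast m (2 ^ w - 1)
    have halt : decimalToFlipBinary_alt (m : Int)
        = (List.range w).map (fun i =>
            PySem.Int.band (((m ^^^ (2 ^ w - 1) : Nat) : Int) >>> (w - 1 - i)) 1) := by
      simp only [decimalToFlipBinary_alt, if_neg hle, ← hw, hcomp]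
    rw [halt]
    apply List.ext_getElem
    · simp [hlen]
    · intro i h1 h2
      simp only [List.getElem_map, List.getElem_reverse, List.getElem_range]
      have hiw : i < w := by simpa [hlen] using h2
      set j := w - 1 - i with hj
      have hjw : j < w := by omega
      have hArev : (pvLoopA (m:Int)).length - 1 - i = j := by omega
      have hjlen : j < (pvBitsN m).length := by rw [pvBitsN_length]; exact hjw
      rw [List.getElem_eq_getD, hArev, pvLoopA_natCast, pvBitsN_getD m j hjlen]
      -- B side: shift and mask
      have hshift : (((m ^^^ (2 ^ w - 1) : Nat) : Int) >>> j)
          = (((m ^^^ (2 ^ w - 1)) >>> j : Nat) : Int) := by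
        simp [Int.shiftRight_eq_div_pow, Nat.shiftRight_eq_div_pow]
      rw [hshift, PySem.Int.band_one,
        show PySem.Int.mod (((m ^^^ (2 ^ w - 1)) >>> j : Nat) : Int) 2
            = ((((m ^^^ (2 ^ w - 1)) >>> j) % 2 : Nat) : Int) from by
          exact_mod_cast PySem.Int.mod_natCast ((m ^^^ (2 ^ w - 1)) >>> j) 2]
      have htb : (m ^^^ (2 ^ w - 1)).testBit j = !(m.testBit j) := by
        rw [Nat.testBit_xor, Nat.testBit_two_pow_sub_one]
        simp [hjw]
      have hmod : ((m ^^^ (2 ^ w - 1)) >>> j) % 2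
          = if (m ^^^ (2 ^ w - 1)).testBit j then 1 else 0 := by
        rw [Nat.testBit, Nat.shiftRight_eq_div_pow]
        rcases Nat.mod_two_eq_zero_or_one ((m ^^^ (2 ^ w - 1)) / 2 ^ j) with hm | hm <;>
          simp [hm]
      rw [hmod, htb]
      by_cases hb : m.testBit j <;> simp [hb, pvFlip]
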